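-- pv_equiv track=rewrite | github.com/SamDeiter/context-monitor | migrate_phase5_step2.py | replace_method_body
-- ===== SOURCE A (Python) =====
-- def replace_method_body(content, method_name, new_body):
--     """Replace a method's body with a thin wrapper"""
--     lines = content.split('\n')
--     result = []
--     in_target_method = False
--     method_indent = 0
--     skip_lines = False
--
--     i = 0
--     while i < len(lines):
--         line = lines[i]
--
--         if f'def {method_name}(self' in line and not in_target_method:
--             in_target_method = True
--             method_indent = len(line) - len(line.lstrip())
--             # Preserve original signature
--             result.append(line)
--             result.append(f'{" " * method_indent}    """Delegated to analytics_dashboard module (Phase 5: V2.48)"""')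
--             result.append(f'{" " * method_indent}    {new_body}')
--             skip_lines = True
--             i += 1
--             continue
--
--         if skip_lines:
--             stripped = line.strip()
--             if stripped and not stripped.startswith('#') and not stripped.startswith('"""') and not stripped.startswith("'''"):
--                 current_indent = len(line) - len(line.lstrip())
--                 if current_indent <= method_indent and (stripped.startswith('def ') or stripped.startswith('class ')):
--                     skip_lines = False
--                     in_target_method = False
--                     result.append(line)
--             i += 1
--             continue
--
--         result.append(line)
--         i += 1
--
--     return '\n'.join(result)
-- ===== SOURCE B (Python) =====
-- def _is_boundary(line, method_indent):
--     stripped = line.strip()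
--     return (bool(stripped)
--             and not stripped.startswith('#')
--             and not stripped.startswith('"""')
--             and not stripped.startswith("'''")
--             and len(line) - len(line.lstrip()) <= method_indent
--             and (stripped.startswith('def ') or stripped.startswith('class ')))
--
--
-- def replace_method_body(content, method_name, new_body):
--     """Replace a method's body with a thin wrapper (two-phase splice)."""
--     needle = f'def {method_name}(self'
--     lines = content.split('\n')
--     out = []
--     while True:
--         j = next((i for i, l in enumerate(lines) if needle in l), None)
--         if j is None:
--             out.extend(lines)
--             break
--         out.extend(lines[:j + 1])
--         sig = lines[j]
--         method_indent = len(sig) - len(sig.lstrip())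
--         out.append(' ' * method_indent + '    """Delegated to analytics_dashboard module (Phase 5: V2.48)"""')
--         out.append(' ' * method_indent + '    ' + new_body)
--         rest = lines[j + 1:]
--         k = next((i for i, l in enumerate(rest) if _is_boundary(l, method_indent)), None)
--         if k is None:
--             break
--         out.append(rest[k])
--         lines = rest[k + 1:]
--     return '\n'.join(out)
-- ===== Notes on version B (the rewrite author's own statement) =====
-- stated objective: alternative
-- what changed: A's single line-by-line pass with in_target/skip_lines state flags is replaced by a two-phase splice: repeatedly find the next signature match by index, copy the prefix wholesale, emit the wrapper, then scan forward for the closing def/class boundary and resume from there.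
import Mathlib
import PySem

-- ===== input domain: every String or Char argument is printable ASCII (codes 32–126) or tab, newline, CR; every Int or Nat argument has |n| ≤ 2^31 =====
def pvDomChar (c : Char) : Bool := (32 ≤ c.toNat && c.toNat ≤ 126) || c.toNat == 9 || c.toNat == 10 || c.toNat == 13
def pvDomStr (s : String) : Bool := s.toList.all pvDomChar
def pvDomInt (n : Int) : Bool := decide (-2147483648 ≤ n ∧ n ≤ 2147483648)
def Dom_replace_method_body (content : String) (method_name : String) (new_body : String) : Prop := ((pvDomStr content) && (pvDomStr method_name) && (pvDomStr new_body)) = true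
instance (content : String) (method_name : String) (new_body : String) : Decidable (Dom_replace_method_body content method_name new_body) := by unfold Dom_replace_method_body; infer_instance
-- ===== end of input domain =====

-- ===== PORT A =====
-- B rewrites A's single stateful line-by-line pass as a two-phase splice (find the next
-- match, then scan forward for the closing boundary); same output, different decomposition.

-- Python's `len(line) - len(line.lstrip())` (shared helper; exact via PySem.Str.len/lstrip)
def pvIndent (line : String) : Int :=
  PySem.Str.len line - PySem.Str.len (PySem.Str.lstrip line)

-- Python's `' ' * n` for n = an indent width (exact: ASCII space repetition; n ≥ 0 here)
def pvSpaces (n : Int) : String := String.ofList (List.replicate n.toNat ' ')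

def pvDocLine (mi : Int) : String :=
  pvSpaces mi ++ "    \"\"\"Delegated to analytics_dashboard module (Phase 5: V2.48)\"\"\""

def pvBodyLine (mi : Int) (new_body : String) : String :=
  pvSpaces mi ++ "    " ++ new_body

-- the while-loop of A: state (in_target_method, method_indent, skip_lines), one line at a time
def pvGoA (needle new_body : String) :
    List String → Bool → Int → Bool → List String
  | [], _, _, _ => []
  | line :: rest, inT, mi, skip =>
    if PySem.Str.isIn needle line && !inT then
      let mi' := pvIndent line
      line :: pvDocLine mi' :: pvBodyLine mi' new_body ::
        pvGoA needle new_body rest true mi' true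
    else if skip then
      let stripped := PySem.Str.strip line
      if stripped != "" && !PySem.Str.startswith stripped "#" &&
          !PySem.Str.startswith stripped "\"\"\"" && !PySem.Str.startswith stripped "'''" then
        if decide (pvIndent line ≤ mi) &&
            (PySem.Str.startswith stripped "def " || PySem.Str.startswith stripped "class ") then
          line :: pvGoA needle new_body rest false mi false
        else
          pvGoA needle new_body rest inT mi skip
      else
        pvGoA needle new_body rest inT mi skip
    else
      line :: pvGoA needle new_body rest inT mi skip

def replace_method_body (content : String) (method_name : String) (new_body : String) : String :=
  -- content.split('\n'): the separator is non-empty, so Str.split? is always `some`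
  PySem.Str.join "\n"
    (pvGoA ("def " ++ method_name ++ "(self") new_body
      ((PySem.Str.split? content "\n").getD []) false 0 false)

-- ===== PORT B =====
-- Source B's `_is_boundary(line, method_indent)`
def pvIsBoundary (mi : Int) (line : String) : Bool :=
  let stripped := PySem.Str.strip line
  (stripped != "" && !PySem.Str.startswith stripped "#" &&
      !PySem.Str.startswith stripped "\"\"\"" && !PySem.Str.startswith stripped "'''") &&
  (decide (pvIndent line ≤ mi) &&
      (PySem.Str.startswith stripped "def " || PySem.Str.startswith stripped "class "))

-- Source B's while-loop: find next needle match, splice, scan to boundary, repeat on the suffix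
def pvGoB (needle new_body : String) : List String → List String
  | [] => []
  | l :: rest' =>
    let lines := l :: rest'
    match lines.findIdx? (fun l => PySem.Str.isIn needle l) with
    | none => lines
    | some j =>
      let sig := lines.getD j ""
      let mi := pvIndent sig
      let rest := lines.drop (j + 1)
      lines.take (j + 1) ++ pvDocLine mi :: pvBodyLine mi new_body ::
        (match rest.findIdx? (pvIsBoundary mi) with
         | none => []
         | some k => rest.getD k "" :: pvGoB needle new_body (rest.drop (k + 1)))
termination_by lines => lines.length
decreasing_by
  simp [List.length_drop]

def replace_method_body_alt (content : String) (method_name : String) (new_body : String) : String :=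
  PySem.Str.join "\n"
    (pvGoB ("def " ++ method_name ++ "(self") new_body
      ((PySem.Str.split? content "\n").getD []))

-- ===== PRECONDITION & SPEC =====
def Spec_replace_method_body (content : String) (method_name : String) (new_body : String) (out : String) : Prop := out = replace_method_body_alt content method_name new_body
instance (content : String) (method_name : String) (new_body : String) (out : String) : Decidable (Spec_replace_method_body content method_name new_body out) := by unfold Spec_replace_method_body; infer_instance

-- ===== CLAIM (what is proved, stated in full; the proofs are below) =====
def Claim_equal_replace_method_body : Prop := ∀ (content : String) (method_name : String) (new_body : String), Dom_replace_method_body content method_name new_body → Spec_replace_method_body content method_name new_body (replace_method_body content method_name new_body)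

-- ===== LEMMAS AND PROOFS =====

-- the boundary-scan phase of pvGoB, named so the unfolding lemmas can speak about it
def pvScanB (needle new_body : String) (lines : List String) (mi : Int) : List String :=
  match lines.findIdx? (pvIsBoundary mi) with
  | none => []
  | some k => lines.getD k "" :: pvGoB needle new_body (lines.drop (k + 1))

lemma pvGoB_nil (n nb : String) : pvGoB n nb [] = [] := by
  rw [pvGoB.eq_def]

lemma pvGoB_cons (n nb l : String) (rest : List String) :
    pvGoB n nb (l :: rest) =
      if PySem.Chars.isIn n.toList l.toList then
        l :: pvDocLine (pvIndent l) :: pvBodyLine (pvIndent l) nb ::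
          pvScanB n nb rest (pvIndent l)
      else l :: pvGoB n nb rest := by
  rw [pvGoB.eq_def]
  by_cases h : PySem.Chars.isIn n.toList l.toList
  · simp [List.findIdx?_cons, h, pvScanB]
  · simp only [List.findIdx?_cons, PySem.Str.isIn_eq, h, Bool.false_eq_true, reduceIte]
    cases hj : rest.findIdx? (fun l => PySem.Str.isIn n l) with
    | none =>
      rw [pvGoB.eq_def]
      cases rest with
      | nil => simp
      | cons r rs => simp [List.findIdx?_cons, PySem.Str.isIn_eq] at hj ⊢
                     simp [hj]
    | some j =>
      rw [pvGoB.eq_def]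
      cases rest with
      | nil => simp at hj
      | cons r rs =>
        simp only [PySem.Str.isIn_eq] at hj
        simp [hj]

lemma pvScanB_nil (n nb : String) (mi : Int) : pvScanB n nb [] mi = [] := by
  simp [pvScanB]

lemma pvScanB_cons (n nb l : String) (rest : List String) (mi : Int) :
    pvScanB n nb (l :: rest) mi =
      if pvIsBoundary mi l then l :: pvGoB n nb rest
      else pvScanB n nb rest mi := by
  unfold pvScanB
  rw [List.findIdx?_cons]
  by_cases h : pvIsBoundary mi l
  · simp [h]
  · simp only [h, Bool.false_eq_true, reduceIte]
    cases rest.findIdx? (pvIsBoundary mi) <;> simp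

-- joint loop invariant: A's pass in copy mode is B's match phase,
-- and A's pass in skip mode (with the current method indent) is B's boundary scan
lemma pvGoA_eq (n nb : String) (lines : List String) :
    (∀ mi, pvGoA n nb lines false mi false = pvGoB n nb lines) ∧
    (∀ mi, pvGoA n nb lines true mi true = pvScanB n nb lines mi) := by
  induction lines with
  | nil => exact ⟨fun _ => by simp [pvGoA, pvGoB_nil], fun _ => by simp [pvGoA, pvScanB_nil]⟩
  | cons l rest ih =>
    constructor
    · intro mi
      rw [pvGoA, pvGoB_cons]
      by_cases h : PySem.Chars.isIn n.toList l.toList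
      · simp [h, ih.2 (pvIndent l)]
      · simp [h, ih.1 mi]
    · intro mi
      rw [pvGoA, pvScanB_cons]
      simp only [Bool.not_true, Bool.and_false, Bool.false_eq_true, reduceIte]
      unfold pvIsBoundary
      by_cases h1 : (PySem.Str.strip l != "" && !PySem.Str.startswith (PySem.Str.strip l) "#" &&
          !PySem.Str.startswith (PySem.Str.strip l) "\"\"\"" &&
          !PySem.Str.startswith (PySem.Str.strip l) "'''") = true
      · by_cases h2 : (decide (pvIndent l ≤ mi) &&
            (PySem.Str.startswith (PySem.Str.strip l) "def " ||
             PySem.Str.startswith (PySem.Str.strip l) "class ")) = true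
        · simp only [h1, h2, Bool.and_self, reduceIte, ih.1 mi]
        · simp only [h1, h2, Bool.and_false, Bool.false_eq_true, reduceIte, ih.2 mi]
      · simp only [h1, Bool.false_and, Bool.false_eq_true, reduceIte, ih.2 mi]

-- ===== VERDICT (by name: the statement is the Claim_ definition above) =====
theorem replace_method_body_spec : Claim_equal_replace_method_body := by
  intro content method_name new_body _
  unfold Spec_replace_method_body replace_method_body replace_method_body_alt
  rw [(pvGoA_eq _ _ _).1]
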